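-- pv_equiv track=rewrite | github.com/sebo21cc21/Python_first_year | lista3zad2.py | funkcja_czy_napis
-- ===== SOURCE A (Python) =====
-- def funkcja_czy_napis(napis):
--     """ Funckja do posortowania elementow w tablicy
--     Args:
--         tab (list): tablica podanych elementow #moga byc typu float argumenty
--
--     Returns:
--         list: tablica posortowanych elementów
--     """
--     n = len(napis) #dlugosc tablicy
--     if n == 0 or n%2 != 0: #warunki niespełnienia
--         return False #nie nalezy do jezyka
--     else: #przeciwny wypadek
--         i = 0
--         while i < n/2: #2 razy mniejsza długosc od tablicy, gdyż sprawdzamy po połowie aa||bb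
--             if(napis[i] != 'a' or napis[n-i-1] != 'b' ): #warunki sprawdzania od początku części a oraz od końca częsci b
--                 return False #nie nalezy do jezyka
--             else:
--                 i+=1 #inkrementacja
--         return True #nalezy do jezyka
-- ===== SOURCE B (Python) =====
-- def funkcja_czy_napis(napis):
--     n = len(napis)
--     if n == 0 or n % 2 != 0:
--         return False
--     # forward scan: count the run of leading 'a's
--     i = 0
--     while i < n and napis[i] == 'a':
--         i += 1
--     if i != n // 2:
--         return False
--     # the remaining half must be all 'b'
--     while i < n:
--         if napis[i] != 'b':
--             return False
--         i += 1
--     return True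
-- ===== Notes on version B (the rewrite author's own statement) =====
-- stated objective: alternative
-- what changed: A checks pairs (napis[i],napis[n-i-1]) from both ends over n/2 iterations; B instead scans forward once, counting the run of leading 'a's, requires it to be exactly n//2, then verifies the rest is all 'b'.
import Mathlib
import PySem

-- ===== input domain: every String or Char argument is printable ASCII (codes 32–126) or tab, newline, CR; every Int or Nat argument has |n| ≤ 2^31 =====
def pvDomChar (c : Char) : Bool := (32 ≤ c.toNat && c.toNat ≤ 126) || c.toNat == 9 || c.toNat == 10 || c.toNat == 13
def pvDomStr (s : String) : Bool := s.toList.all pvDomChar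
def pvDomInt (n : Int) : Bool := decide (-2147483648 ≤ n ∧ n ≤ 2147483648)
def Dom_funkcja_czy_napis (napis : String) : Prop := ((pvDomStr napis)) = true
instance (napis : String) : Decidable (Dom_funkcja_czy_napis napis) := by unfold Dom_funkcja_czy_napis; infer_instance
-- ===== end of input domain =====

-- B replaces A's two-ended pairwise loop (napis[i] vs napis[n-i-1]) by a single forward scan:
-- count the leading run of 'a's, require it to be exactly n//2, then check the suffix is all 'b' (alternative, same cost).

-- ===== PORT A =====
-- A's while loop: i from 0 while i < n/2; n is even here, so Python's float comparison
-- i < n/2 coincides with i < n/2 over ℕ. Indices i and n-i-1 are always in range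
-- (i < n/2 ≤ n), so getD never takes its default (no IndexError in Python).
def pvLoopA (l : List Char) (n h i : Nat) : Bool :=
  if i < h then
    if l.getD i ' ' ≠ 'a' ∨ l.getD (n - i - 1) ' ' ≠ 'b' then false
    else pvLoopA l n h (i + 1)
  else true
termination_by h - i

def funkcja_czy_napis (napis : String) : Bool :=
  let l := napis.toList
  let n := l.length
  if n = 0 ∨ n % 2 ≠ 0 then false
  else pvLoopA l n (n / 2) 0

-- ===== PORT B =====
-- B's first while loop: advance i while i < n and napis[i] == 'a'; returns the final i
def pvRunB (l : List Char) (n i : Nat) : Nat :=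
  if i < n then
    if l.getD i ' ' = 'a' then pvRunB l n (i + 1) else i
  else i
termination_by n - i

-- B's second while loop: every remaining element must be 'b'
def pvAllBB (l : List Char) (n i : Nat) : Bool :=
  if i < n then
    if l.getD i ' ' ≠ 'b' then false else pvAllBB l n (i + 1)
  else true
termination_by n - i

def funkcja_czy_napis_alt (napis : String) : Bool :=
  let l := napis.toList
  let n := l.length
  if n = 0 ∨ n % 2 ≠ 0 then false
  else
    let i := pvRunB l n 0
    if i ≠ n / 2 then false
    else pvAllBB l n i

-- ===== PRECONDITION & SPEC =====
def Spec_funkcja_czy_napis (napis : String) (out : Bool) : Prop := out = funkcja_czy_napis_alt napis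
instance (napis : String) (out : Bool) : Decidable (Spec_funkcja_czy_napis napis out) := by unfold Spec_funkcja_czy_napis; infer_instance

-- ===== CLAIM (what is proved, stated in full; the proofs are below) =====
def Claim_equal_funkcja_czy_napis : Prop := ∀ (napis : String), Dom_funkcja_czy_napis napis → Spec_funkcja_czy_napis napis (funkcja_czy_napis napis)

-- ===== LEMMAS AND PROOFS =====

-- A's loop returns true iff every remaining pair (j, n-j-1), j < h, is ('a','b')
theorem pvLoopA_iff (l : List Char) (n h i : Nat) :
    pvLoopA l n h i = true ↔
      ∀ j, i ≤ j → j < h → l.getD j ' ' = 'a' ∧ l.getD (n - j - 1) ' ' = 'b' := by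
  fun_induction pvLoopA with
  | case1 i hlt hbad =>
      simp only [Bool.false_eq_true, false_iff]
      intro hall
      rcases hbad with hb | hb
      · exact hb (hall _ le_rfl hlt).1
      · exact hb (hall _ le_rfl hlt).2
  | case2 i hlt hok ih =>
      push Not at hok
      rw [ih]
      constructor
      · intro hall j hij hjh
        rcases Nat.eq_or_lt_of_le hij with rfl | hlt'
        · exact hok
        · exact hall j hlt' hjh
      · intro hall j hij hjh
        exact hall j (Nat.le_of_succ_le hij) hjh
  | case3 i hge =>
      simp only [true_iff]
      intro j hij hjh
      omega

-- B's runscan: the result bounds, everything before it is 'a', and it stops at a non-'a'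
theorem pvRunB_facts (l : List Char) (n i : Nat) (hin : i ≤ n) :
    i ≤ pvRunB l n i ∧ pvRunB l n i ≤ n ∧
    (∀ k, i ≤ k → k < pvRunB l n i → l.getD k ' ' = 'a') ∧
    (pvRunB l n i < n → l.getD (pvRunB l n i) ' ' ≠ 'a') := by
  fun_induction pvRunB with
  | case1 i hlt ha ih =>
      obtain ⟨h1, h2, h3, h4⟩ := ih (by omega)
      refine ⟨by omega, h2, ?_, h4⟩
      intro k hik hk
      rcases Nat.eq_or_lt_of_le hik with rfl | hlt'
      · exact ha
      · exact h3 k hlt' hk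
  | case2 i hlt ha =>
      exact ⟨le_rfl, by omega, fun k hik hk => by omega, fun _ => ha⟩
  | case3 i hge =>
      exact ⟨le_rfl, by omega, fun k hik hk => by omega, fun h => by omega⟩

-- B's suffix scan returns true iff everything from i on is 'b'
theorem pvAllBB_iff (l : List Char) (n i : Nat) :
    pvAllBB l n i = true ↔ ∀ j, i ≤ j → j < n → l.getD j ' ' = 'b' := by
  fun_induction pvAllBB with
  | case1 i hlt hnb =>
      simp only [Bool.false_eq_true, false_iff]
      intro hall; exact hnb (hall i le_rfl hlt)
  | case2 i hlt hnb ih =>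
      push Not at hnb
      rw [ih]
      constructor
      · intro hall j hij hjn
        rcases Nat.eq_or_lt_of_le hij with rfl | hlt'
        · exact hnb
        · exact hall j hlt' hjn
      · intro hall j hij hjn; exact hall j (Nat.le_of_succ_le hij) hjn
  | case3 i hge =>
      simp only [true_iff]; intro j hij hjn; omega

-- the two loop groups agree on every even-length nonempty string
theorem pvMain (l : List Char) (n : Nat) (hn : n = l.length) (h0 : ¬(n = 0 ∨ n % 2 ≠ 0)) :
    pvLoopA l n (n / 2) 0 =
      (if pvRunB l n 0 ≠ n / 2 then false else pvAllBB l n (pvRunB l n 0)) := by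
  push Not at h0
  obtain ⟨hne, hev⟩ := h0
  set h := n / 2 with hh
  have hnh : n - h = h := by omega
  have hpos : 0 < h := by omega
  obtain ⟨hr1, hr2, hr3, hr4⟩ := pvRunB_facts l n 0 (by omega)
  set j := pvRunB l n 0 with hj
  by_cases hjh : j = h
  · simp only [hjh, ne_eq, not_true_eq_false, ite_false]
    by_cases hb : pvAllBB l n h = true
    · rw [hb, (pvLoopA_iff l n h 0)]
      intro k _ hk
      refine ⟨hr3 k (by omega) (by omega), ?_⟩
      exact (pvAllBB_iff l n h).mp hb (n - k - 1) (by omega) (by omega)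
    · rw [Bool.not_eq_true] at hb
      rw [hb]
      rw [← Bool.not_eq_true, pvLoopA_iff]
      intro hall
      rw [← Bool.not_eq_true, pvAllBB_iff] at hb
      push Not at hb
      obtain ⟨m, hm1, hm2, hm3⟩ := hb
      have hbm := (hall (n - m - 1) (by omega) (by omega)).2
      have hmeq : n - (n - m - 1) - 1 = m := by omega
      rw [hmeq] at hbm
      exact hm3 hbm
  · rw [if_pos hjh]
    rw [← Bool.not_eq_true, pvLoopA_iff]
    intro hall
    rcases Nat.lt_or_ge j h with hlt | hge
    · exact hr4 (by omega) (hall j (by omega) hlt).1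
    · have hjgt : h < j := lt_of_le_of_ne hge (fun e => hjh e.symm)
      have ha : l.getD h ' ' = 'a' := hr3 h (by omega) hjgt
      have hbb := (hall (n - h - 1) (by omega) (by omega)).2
      have heq : n - (n - h - 1) - 1 = h := by omega
      rw [heq, ha] at hbb
      exact absurd hbb (by decide)

-- ===== VERDICT (by name: the statement is the Claim_ definition above) =====
theorem funkcja_czy_napis_spec : Claim_equal_funkcja_czy_napis := by
  intro napis _
  unfold Spec_funkcja_czy_napis funkcja_czy_napis funkcja_czy_napis_alt
  simp only []
  split
  · rfl
  · next h0 => exact pvMain _ _ rfl h0
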